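-- pv_equiv track=rewrite | github.com/onikw/Hackathon_NullPointers | Model/for_api/calculate_heures.py | most_expensive_segment
-- ===== SOURCE A (Python) =====
-- def most_expensive_segment(array, length):
--     n = len(array)
--     array = array + array[:length-1]  # Extend the array to simulate circular behavior
--
--     max_sum = sum(array[:length])  # Sum of the initial segment
--     max_index = 0
--     current_sum = max_sum
--
--     for i in range(1, n):
--         current_sum = current_sum - array[i - 1] + array[i + length - 1]
--         if current_sum > max_sum:
--             max_sum = current_sum
--             max_index = i
--
--     return max_index % n, (max_index + length - 1) % n  # Return start and end indices
-- ===== SOURCE B (Python) =====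
-- def most_expensive_segment(array, length):
--     n = len(array)
--     ext = array + array[:length-1]
--     prefix = [0]
--     total = 0
--     for x in ext:
--         total += x
--         prefix.append(total)
--     best_sum = prefix[length]
--     best_i = 0
--     for i in range(1, n):
--         s = prefix[i + length] - prefix[i]
--         if s > best_sum:
--             best_sum = s
--             best_i = i
--     return best_i % n, (best_i + length - 1) % n
-- ===== Notes on version B (the rewrite author's own statement) =====
-- stated objective: alternative
-- what changed: Replaces A's incremental sliding-window recurrence (subtract the leaving element, add the entering one) by a precomputed prefix-sum table over the extended array, each window sum computed independently as a difference of two table entries.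
-- outside the precondition, e.g. on most_expensive_segment([8, 9, 8, -5, 2, 5], -3): A returns (5, 1), B returns (0, 2)
import Mathlib
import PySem

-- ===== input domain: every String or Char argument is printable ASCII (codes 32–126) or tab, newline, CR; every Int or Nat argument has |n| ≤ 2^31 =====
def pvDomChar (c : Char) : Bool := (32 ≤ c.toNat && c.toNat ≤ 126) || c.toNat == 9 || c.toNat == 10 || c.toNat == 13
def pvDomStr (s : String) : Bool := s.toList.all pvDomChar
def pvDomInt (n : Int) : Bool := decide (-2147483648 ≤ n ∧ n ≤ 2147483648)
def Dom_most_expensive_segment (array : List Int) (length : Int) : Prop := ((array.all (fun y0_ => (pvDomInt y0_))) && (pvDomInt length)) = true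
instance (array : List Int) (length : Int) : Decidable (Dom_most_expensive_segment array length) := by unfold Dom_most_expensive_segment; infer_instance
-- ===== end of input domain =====

-- B replaces A's incremental sliding-window recurrence by a prefix-sum table with
-- per-window differences: a different decomposition of the same O(n) work.

-- ===== PORT A =====
def most_expensive_segment (array : List Int) (length : Int) : Int × Int :=
  let n : Int := array.length
  let arr := array ++ PySem.List.slice array none (some (length - 1))
  let max_sum := (PySem.List.slice arr none (some length)).sum
  let st := (PySem.List.pyRange 1 n 1).foldl
    (fun (st : Int × Int × Int) i =>
      let c := st.2.2 - PySem.List.pyGetD arr (i - 1) 0 + PySem.List.pyGetD arr (i + length - 1) 0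
      if c > st.1 then (c, i, c) else (st.1, st.2.1, c))
    (max_sum, 0, max_sum)
  (PySem.Int.mod st.2.1 n, PySem.Int.mod (st.2.1 + length - 1) n)

-- ===== PORT B =====
def most_expensive_segment_alt (array : List Int) (length : Int) : Int × Int :=
  let n : Int := array.length
  let ext := array ++ PySem.List.slice array none (some (length - 1))
  let pfx := (ext.foldl
    (fun (p : List Int × Int) x =>
      let t := p.2 + x
      (p.1 ++ [t], t)) ([0], 0)).1
  let best := (PySem.List.pyRange 1 n 1).foldl
    (fun (st : Int × Int) i =>
      let s := PySem.List.pyGetD pfx (i + length) 0 - PySem.List.pyGetD pfx i 0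
      if s > st.1 then (s, i) else st)
    (PySem.List.pyGetD pfx length 0, 0)
  (PySem.Int.mod best.2 n, PySem.Int.mod (best.2 + length - 1) n)

-- ===== PRECONDITION & SPEC =====
-- Pre_ excludes: empty arrays (A raises ZeroDivisionError at the final '% n'); length > n+1
-- (A raises IndexError); and negative lengths, on which a "segment of given length" is
-- meaningless and both implementations' negative-index wraparound results are accidental.
def Pre_most_expensive_segment (array : List Int) (length : Int) : Prop :=
  array ≠ [] ∧ 0 ≤ length ∧ length ≤ (array.length : Int) + 1
instance (array : List Int) (length : Int) : Decidable (Pre_most_expensive_segment array length) := by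
  unfold Pre_most_expensive_segment; infer_instance
def pvWitness_most_expensive_segment : List Int × Int := ([3, -1, 4, 1], 2)

def Spec_most_expensive_segment (array : List Int) (length : Int) (out : Int × Int) : Prop := out = most_expensive_segment_alt array length
instance (array : List Int) (length : Int) (out : Int × Int) : Decidable (Spec_most_expensive_segment array length out) := by unfold Spec_most_expensive_segment; infer_instance

-- ===== CLAIM (what is proved, stated in full; the proofs are below) =====
def Claim_equal_most_expensive_segment : Prop := ∀ (array : List Int) (length : Int), Dom_most_expensive_segment array length → Pre_most_expensive_segment array length → Spec_most_expensive_segment array length (most_expensive_segment array length)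

-- ===== LEMMAS AND PROOFS =====

-- proof-only helper: the list of running prefix totals starting from t
def pvPrefixes : List Int → Int → List Int
  | [], _ => []
  | x :: xs, t => (t + x) :: pvPrefixes xs (t + x)

theorem pvPrefixes_length (l : List Int) (t : Int) : (pvPrefixes l t).length = l.length := by
  induction l generalizing t with
  | nil => rfl
  | cons x xs ih => simp [pvPrefixes, ih]

theorem pvFold_prefix (l : List Int) (acc : List Int) (t : Int) :
    (l.foldl (fun (p : List Int × Int) x => (p.1 ++ [p.2 + x], p.2 + x)) (acc, t))
      = (acc ++ pvPrefixes l t, t + l.sum) := by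
  induction l generalizing acc t with
  | nil => simp [pvPrefixes]
  | cons x xs ih => simp [pvPrefixes, ih, add_assoc]

theorem pvPrefixes_getElem? (l : List Int) (t : Int) (k : Nat) (h : k < l.length) :
    (pvPrefixes l t)[k]? = some (t + (l.take (k+1)).sum) := by
  induction l generalizing t k with
  | nil => simp at h
  | cons x xs ih =>
    cases k with
    | zero => simp [pvPrefixes]
    | succ k =>
      simp only [pvPrefixes, List.getElem?_cons_succ]
      rw [ih (t + x) k (by simpa using h)]
      simp [add_assoc]

theorem pvP_get (ext : List Int) (j : Nat) (h : j ≤ ext.length) :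
    (0 :: pvPrefixes ext 0)[j]? = some ((ext.take j).sum) := by
  cases j with
  | zero => simp
  | succ k =>
    simp only [List.getElem?_cons_succ]
    rw [pvPrefixes_getElem? ext 0 k (by omega)]
    simp

theorem pvP_getD (ext : List Int) (i : Int) (h0 : 0 ≤ i) (h1 : i ≤ (ext.length : Int)) :
    PySem.List.pyGetD (0 :: pvPrefixes ext 0) i 0 = (ext.take i.toNat).sum := by
  rw [PySem.List.pyGetD_eq_getElem _ 0 h0 (by simp [pvPrefixes_length]; omega)]
  have := pvP_get ext i.toNat (by omega)
  have h2 : i.toNat < (0 :: pvPrefixes ext 0).length := by simp [pvPrefixes_length]; omega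
  rw [List.getElem?_eq_getElem h2] at this
  exact Option.some.inj this

-- the sum of the window of size L starting at j
def pvW (ext : List Int) (L : Int) (j : Int) : Int :=
  (ext.take (j + L).toNat).sum - (ext.take j.toNat).sum

theorem pvW_rec (ext : List Int) (L a : Int) (hL : 1 ≤ L) (ha : 1 ≤ a)
    (hub : a + L ≤ (ext.length : Int)) (hub2 : a ≤ (ext.length : Int)) :
    pvW ext L a
      = pvW ext L (a - 1) - PySem.List.pyGetD ext (a - 1) 0
          + PySem.List.pyGetD ext (a + L - 1) 0 := by
  have hj1 : (a - 1).toNat < ext.length := by omega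
  have hj2 : (a + L - 1).toNat < ext.length := by omega
  rw [PySem.List.pyGetD_eq_getElem ext 0 (by omega : (0:Int) ≤ a - 1) (by omega),
      PySem.List.pyGetD_eq_getElem ext 0 (by omega : (0:Int) ≤ a + L - 1) (by omega)]
  unfold pvW
  have e1 : a.toNat = (a - 1).toNat + 1 := by omega
  have e2 : (a + L).toNat = (a + L - 1).toNat + 1 := by omega
  rw [e1, e2, List.sum_take_succ _ _ hj1, List.sum_take_succ _ _ hj2]
  have e3 : (a - 1 + L).toNat = (a + L - 1).toNat := by omega
  rw [e3]
  ring

theorem pvLoop (ext : List Int) (L n : Int) (hL : 1 ≤ L)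
    (hext : (ext.length : Int) = n + L - 1) :
    ∀ (k : Nat) (a ms mi : Int), 1 ≤ a → a + k = n →
      (let r := (PySem.List.pyRange a n 1).foldl
        (fun (st : Int × Int × Int) i =>
          (if st.2.2 - PySem.List.pyGetD ext (i - 1) 0 + PySem.List.pyGetD ext (i + L - 1) 0 > st.1
            then (st.2.2 - PySem.List.pyGetD ext (i - 1) 0 + PySem.List.pyGetD ext (i + L - 1) 0, i,
                  st.2.2 - PySem.List.pyGetD ext (i - 1) 0 + PySem.List.pyGetD ext (i + L - 1) 0)
            else (st.1, st.2.1, st.2.2 - PySem.List.pyGetD ext (i - 1) 0 + PySem.List.pyGetD ext (i + L - 1) 0)))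
        (ms, mi, pvW ext L (a - 1));
      (r.1, r.2.1))
      = (PySem.List.pyRange a n 1).foldl
        (fun (st : Int × Int) i =>
          (if PySem.List.pyGetD (0 :: pvPrefixes ext 0) (i + L) 0 - PySem.List.pyGetD (0 :: pvPrefixes ext 0) i 0 > st.1
            then (PySem.List.pyGetD (0 :: pvPrefixes ext 0) (i + L) 0 - PySem.List.pyGetD (0 :: pvPrefixes ext 0) i 0, i)
            else st))
        (ms, mi) := by
  intro k
  induction k with
  | zero =>
    intro a ms mi ha hk
    rw [PySem.List.pyRange_one_eq_nil (by omega)]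
    simp
  | succ k ih =>
    intro a ms mi ha hk
    rw [PySem.List.pyRange_one_cons (by omega)]
    simp only [List.foldl_cons]
    have han : a < n := by omega
    have hs : PySem.List.pyGetD (0 :: pvPrefixes ext 0) (a + L) 0
        - PySem.List.pyGetD (0 :: pvPrefixes ext 0) a 0 = pvW ext L a := by
      rw [pvP_getD ext (a + L) (by omega) (by omega), pvP_getD ext a (by omega) (by omega)]
      rfl
    have hc : pvW ext L (a - 1) - PySem.List.pyGetD ext (a - 1) 0
        + PySem.List.pyGetD ext (a + L - 1) 0 = pvW ext L a := by
      rw [pvW_rec ext L a hL ha (by omega) (by omega)]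
    rw [hs, hc]
    have ha1 : pvW ext L a = pvW ext L (a + 1 - 1) := by norm_num
    by_cases hgt : pvW ext L a > ms
    · simp only [if_pos hgt]
      rw [ha1]
      exact ih (a + 1) (pvW ext L (a + 1 - 1)) a (by omega) (by omega)
    · simp only [if_neg hgt]
      rw [ha1]
      exact ih (a + 1) ms mi (by omega) (by omega)

theorem pvFoldA_zero (l : List Int) :
    l.foldl (fun (st : Int × Int × Int) _i => if st.2.2 > st.1 then (st.2.2, _i, st.2.2) else (st.1, st.2.1, st.2.2))
      ((0 : Int), (0 : Int), (0 : Int)) = (0, 0, 0) := by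
  induction l with
  | nil => rfl
  | cons x xs ih => simpa using ih

theorem pvFoldB_zero (l : List Int) :
    l.foldl (fun (st : Int × Int) _i => if (0 : Int) > st.1 then ((0 : Int), _i) else st)
      ((0 : Int), (0 : Int)) = (0, 0) := by
  induction l with
  | nil => rfl
  | cons x xs ih => simpa using ih

theorem most_expensive_segment_spec : Claim_equal_most_expensive_segment := by
  intro array L hdom hpre
  obtain ⟨hne, hL0, hLn⟩ := hpre
  have hn1 : 1 ≤ array.length := List.length_pos_iff.mpr hne
  unfold Spec_most_expensive_segment most_expensive_segment most_expensive_segment_alt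
  by_cases hLz : L = 0
  · subst hLz
    simp only [PySem.List.slice_to _ (le_refl (0 : Int)), Int.toNat_zero, List.take_zero,
      List.sum_nil]
    rw [pvFold_prefix]
    dsimp only
    simp only [List.cons_append, List.nil_append, PySem.List.pyGetD_zero_cons,
      add_zero, sub_add_cancel, sub_self]
    rw [pvFoldA_zero, pvFoldB_zero]
  have hL1 : 1 ≤ L := by omega
  have hslice : PySem.List.slice array none (some (L - 1)) = array.take (L - 1).toNat :=
    PySem.List.slice_to array (by omega)
  simp only [hslice]
  rw [pvFold_prefix]
  set ext := array ++ List.take (L - 1).toNat array with hextdef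
  have hlen : ((ext).length : Int) = (array.length : Int) + L - 1 := by
    rw [hextdef]; simp [List.length_take]; omega
  have hsl2 : PySem.List.slice ext none (some L) = ext.take L.toNat :=
    PySem.List.slice_to ext (by omega)
  dsimp only
  simp only [hsl2, List.cons_append, List.nil_append]
  have hinitB : PySem.List.pyGetD (0 :: pvPrefixes ext 0) L 0 = (ext.take L.toNat).sum :=
    pvP_getD ext L (by omega) (by rw [hlen]; omega)
  have hinitA : (ext.take L.toNat).sum = pvW ext L 0 := by
    unfold pvW; norm_num
  rw [hinitB, hinitA]
  have hmain := pvLoop ext L (array.length : Int) hL1 hlen (array.length - 1) 1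
    (pvW ext L 0) 0 (by omega) (by omega)
  norm_num at hmain
  have h2 : ((PySem.List.pyRange 1 (array.length : Int) 1).foldl
      (fun (st : Int × Int × Int) i =>
        (if st.2.2 - PySem.List.pyGetD ext (i - 1) 0 + PySem.List.pyGetD ext (i + L - 1) 0 > st.1
          then (st.2.2 - PySem.List.pyGetD ext (i - 1) 0 + PySem.List.pyGetD ext (i + L - 1) 0, i,
                st.2.2 - PySem.List.pyGetD ext (i - 1) 0 + PySem.List.pyGetD ext (i + L - 1) 0)
          else (st.1, st.2.1, st.2.2 - PySem.List.pyGetD ext (i - 1) 0 + PySem.List.pyGetD ext (i + L - 1) 0)))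
      (pvW ext L 0, 0, pvW ext L 0)).2.1
      = ((PySem.List.pyRange 1 (array.length : Int) 1).foldl
      (fun (st : Int × Int) i =>
        (if PySem.List.pyGetD (0 :: pvPrefixes ext 0) (i + L) 0 - PySem.List.pyGetD (0 :: pvPrefixes ext 0) i 0 > st.1
          then (PySem.List.pyGetD (0 :: pvPrefixes ext 0) (i + L) 0 - PySem.List.pyGetD (0 :: pvPrefixes ext 0) i 0, i)
          else st))
      (pvW ext L 0, 0)).2 := by
    have := congrArg Prod.snd hmain
    simpa using this
  rw [h2]
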